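-- pv_equiv track=rewrite | github.com/tnpfldyd/TIL | 백준/Gold/1030. 프렉탈 평면/프렉탈 평면.py | is_black
-- ===== SOURCE A (Python) =====
-- def is_black(s, r, c, N, K):
--     if s == 0:
--         return False
--     unit = N ** (s - 1)
--     row = r // unit
--     col = c // unit
--     mid_start = (N - K) // 2
--     mid_end = mid_start + K
--     if mid_start <= row < mid_end and mid_start <= col < mid_end:
--         return True
--     return is_black(s - 1, r % unit, c % unit, N, K)
-- ===== SOURCE B (Python) =====
-- def is_black(s, r, c, N, K):
--     mid_start = (N - K) // 2
--     mid_end = mid_start + K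
--     if s <= 0:
--         return False
--     unit = N ** (s - 1)
--     for _ in range(s - 1):
--         row, r = divmod(r, unit)
--         col, c = divmod(c, unit)
--         if mid_start <= row < mid_end and mid_start <= col < mid_end:
--             return True
--         unit //= N
--     return mid_start <= r // unit < mid_end and mid_start <= c // unit < mid_end
-- ===== Notes on version B (the rewrite author's own statement) =====
-- stated objective: alternative
-- what changed: The tail recursion (which recomputes N**(s-1) by exponentiation at every level) is replaced by a build-then-scan loop: the powers of N are built once by repeated multiplication, then a single iterative pass from the most significant level updates the remainders and short-circuits on the first black level.
-- outside the precondition, e.g. on is_black(-2, 1, 1, 1, 1): A returns True, B returns False; on is_black(-1, 0, 0, 2, 0): A raises ZeroDivisionError, B returns False; on is_black(2, 1, 1, 0, 1): A raises ZeroDivisionError, B raises ZeroDivisionError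
import Mathlib
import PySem

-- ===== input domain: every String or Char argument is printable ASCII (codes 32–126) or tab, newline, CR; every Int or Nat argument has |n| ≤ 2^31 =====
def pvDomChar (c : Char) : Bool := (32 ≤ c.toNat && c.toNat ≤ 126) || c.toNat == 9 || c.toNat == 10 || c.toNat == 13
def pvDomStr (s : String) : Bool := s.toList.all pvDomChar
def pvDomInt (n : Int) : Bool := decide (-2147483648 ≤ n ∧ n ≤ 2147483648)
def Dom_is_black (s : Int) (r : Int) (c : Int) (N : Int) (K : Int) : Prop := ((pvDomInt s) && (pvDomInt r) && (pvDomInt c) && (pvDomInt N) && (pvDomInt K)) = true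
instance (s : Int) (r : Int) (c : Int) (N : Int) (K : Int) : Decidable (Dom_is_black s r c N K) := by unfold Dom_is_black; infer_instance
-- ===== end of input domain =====

-- B replaces A's tail recursion (a fresh exponentiation N**(s-1) per level) by building the
-- power list once and scanning it iteratively from the most significant level (objective: alternative).

-- ===== PORT A =====
-- the recursion of A, with the level count as the structural fuel (s ≥ 1 on entry under Pre_)
def isBlackRec : Nat → Int → Int → Int → Int → Bool
  | 0, _, _, _, _ => false
  | t + 1, r, c, N, K =>
    let unit := N ^ t
    let row := PySem.Int.floordiv r unit
    let col := PySem.Int.floordiv c unit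
    let midStart := PySem.Int.floordiv (N - K) 2
    let midEnd := midStart + K
    if midStart ≤ row ∧ row < midEnd ∧ midStart ≤ col ∧ col < midEnd then true
    else isBlackRec t (PySem.Int.mod r unit) (PySem.Int.mod c unit) N K

def is_black (s : Int) (r : Int) (c : Int) (N : Int) (K : Int) : Bool :=
  if s = 0 then false else isBlackRec s.toNat r c N K

-- ===== PORT B =====
-- the peel loop of B: each step does divmod by unit, tests, then unit //= N; the final level
-- is the return expression (unit = 1 there in Python; here the last altLoop state)
def altLoop : Nat → Int → Int → Int → Int → Int → Int → Bool
  | 0, unit, r, c, _, midStart, midEnd =>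
      decide (midStart ≤ PySem.Int.floordiv r unit ∧ PySem.Int.floordiv r unit < midEnd ∧
              midStart ≤ PySem.Int.floordiv c unit ∧ PySem.Int.floordiv c unit < midEnd)
  | n + 1, unit, r, c, N, midStart, midEnd =>
      let row := PySem.Int.floordiv r unit
      let r' := PySem.Int.mod r unit
      let col := PySem.Int.floordiv c unit
      let c' := PySem.Int.mod c unit
      if midStart ≤ row ∧ row < midEnd ∧ midStart ≤ col ∧ col < midEnd then true
      else altLoop n (PySem.Int.floordiv unit N) r' c' N midStart midEnd

def is_black_alt (s : Int) (r : Int) (c : Int) (N : Int) (K : Int) : Bool :=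
  let midStart := PySem.Int.floordiv (N - K) 2
  let midEnd := midStart + K
  if s ≤ 0 then false
  else altLoop (s.toNat - 1) (N ^ (s.toNat - 1)) r c N midStart midEnd

-- ===== PRECONDITION & SPEC =====
-- Pre_ restricts to the natural domain: s is a level count, so negative s is excluded (there A
-- raises RecursionError/ZeroDivisionError for most N, or returns a float-arithmetic accident for
-- |N| = 1); N = 0 with s ≥ 2 is excluded because A divides by zero.
def Pre_is_black (s : Int) (r : Int) (c : Int) (N : Int) (K : Int) : Prop :=
  0 ≤ s ∧ (N ≠ 0 ∨ s ≤ 1)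
instance (s : Int) (r : Int) (c : Int) (N : Int) (K : Int) : Decidable (Pre_is_black s r c N K) := by
  unfold Pre_is_black; infer_instance
def pvWitness_is_black : Int × Int × Int × Int × Int := (2, 3, 4, 3, 1)

def Spec_is_black (s : Int) (r : Int) (c : Int) (N : Int) (K : Int) (out : Bool) : Prop := out = is_black_alt s r c N K
instance (s : Int) (r : Int) (c : Int) (N : Int) (K : Int) (out : Bool) : Decidable (Spec_is_black s r c N K out) := by unfold Spec_is_black; infer_instance

-- ===== CLAIM (what is proved, stated in full; the proofs are below) =====
def Claim_equal_is_black : Prop := ∀ (s : Int) (r : Int) (c : Int) (N : Int) (K : Int), Dom_is_black s r c N K → Pre_is_black s r c N K → Spec_is_black s r c N K (is_black s r c N K)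

-- ===== LEMMAS AND PROOFS =====

theorem alt_base (r c N K : Int) :
    altLoop 0 (N ^ 0) r c N (PySem.Int.floordiv (N - K) 2) (PySem.Int.floordiv (N - K) 2 + K)
    = isBlackRec 1 r c N K := by
  simp [altLoop, isBlackRec]

theorem alt_eq_rec (t : Nat) (r c N K : Int) (hN : N ≠ 0) :
    altLoop t (N ^ t) r c N (PySem.Int.floordiv (N - K) 2) (PySem.Int.floordiv (N - K) 2 + K)
    = isBlackRec (t + 1) r c N K := by
  induction t generalizing r c with
  | zero => exact alt_base r c N K
  | succ t ih =>
    show altLoop (t + 1) _ _ _ _ _ _ = isBlackRec (t + 1 + 1) r c N K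
    rw [altLoop, isBlackRec]
    split
    · rfl
    · have hdiv : PySem.Int.floordiv (N ^ (t + 1)) N = N ^ t := by
        have : (N : Int) ^ (t + 1) = N ^ t * N := by ring
        simp [PySem.Int.floordiv, this, Int.mul_fdiv_cancel _ hN]
      rw [hdiv]
      exact ih _ _

-- ===== VERDICT (by name: the statement is the Claim_ definition above) =====
theorem is_black_spec : Claim_equal_is_black := by
  intro s r c N K _ hpre
  obtain ⟨hs, hNs⟩ := hpre
  unfold Spec_is_black is_black is_black_alt
  by_cases h0 : s = 0
  · subst h0; simp
  · have hpos : 0 < s := lt_of_le_of_ne hs (Ne.symm h0)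
    obtain ⟨t, ht⟩ : ∃ t, s.toNat = t + 1 := ⟨s.toNat - 1, by omega⟩
    simp only [h0, if_false, not_le.mpr hpos, ht]
    rcases hNs with hN | hs1
    · rw [Nat.add_sub_cancel, alt_eq_rec t r c N K hN]
    · have : t = 0 := by omega
      subst this
      rw [Nat.add_sub_cancel, alt_base r c N K]
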